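-- pv_equiv track=rewrite | github.com/HEXRD/hexrdgui | hexrdgui/utils/dicts.py | ensure_all_keys_match
-- ===== SOURCE A (Python) =====
-- def ensure_all_keys_match(dict1: dict, dict2: dict) -> dict:
--     # This ensures that all keys in dict1 match the keys in dict2.
--     # If they do not match, a KeyError will be raised.
--     # A dict is returned where the keys in dict2 are sorted to match
--     # those in dict1.
--
--     def recurse(this: dict, other: dict, ret: dict, path: list) -> None:
--         this_keys = sorted(this.keys())
--         other_keys = sorted(other.keys())
--         if this_keys != other_keys:
--             this_keys_str = ', '.join(f'"{x}"' for x in this_keys)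
--             other_keys_str = ', '.join(f'"{x}"' for x in other_keys)
--             msg = f'keys1 {this_keys_str} failed to match keys2 {other_keys_str}'
--             if path:
--                 path_str = ' -> '.join(path)
--                 msg += f' for path "{path_str}"'
--             raise KeyError(msg)
--
--         for k, v in this.items():
--             if isinstance(v, dict):
--                 ret[k] = {}
--                 recurse(v, other[k], ret[k], path + [k])
--             else:
--                 ret[k] = other[k]
--
--     ret: dict = {}
--     recurse(dict1, dict2, ret, [])
--     return ret
-- ===== SOURCE B (Python) =====
-- def ensure_all_keys_match(dict1: dict, dict2: dict) -> dict:
--     # Flat re-implementation for the declared dict[str, int] domain: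
--     # compare the key views as sets (no sorting on the success path) and
--     # rebuild dict2's values in dict1's key order with a comprehension.
--     if dict1.keys() != dict2.keys():
--         keys1_str = ', '.join(f'"{x}"' for x in sorted(dict1))
--         keys2_str = ', '.join(f'"{x}"' for x in sorted(dict2))
--         raise KeyError(f'keys1 {keys1_str} failed to match keys2 {keys2_str}')
--     return {k: dict2[k] for k in dict1}
-- ===== Notes on version B (the rewrite author's own statement) =====
-- stated objective: simpler
-- what changed: Replaces the recursive helper and its always-sorted key comparison with a flat, non-recursive version for the declared dict[str,int] domain: key views compared as sets (sorting only for the error message) and the reordered dict built by a single comprehension.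
import Mathlib
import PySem

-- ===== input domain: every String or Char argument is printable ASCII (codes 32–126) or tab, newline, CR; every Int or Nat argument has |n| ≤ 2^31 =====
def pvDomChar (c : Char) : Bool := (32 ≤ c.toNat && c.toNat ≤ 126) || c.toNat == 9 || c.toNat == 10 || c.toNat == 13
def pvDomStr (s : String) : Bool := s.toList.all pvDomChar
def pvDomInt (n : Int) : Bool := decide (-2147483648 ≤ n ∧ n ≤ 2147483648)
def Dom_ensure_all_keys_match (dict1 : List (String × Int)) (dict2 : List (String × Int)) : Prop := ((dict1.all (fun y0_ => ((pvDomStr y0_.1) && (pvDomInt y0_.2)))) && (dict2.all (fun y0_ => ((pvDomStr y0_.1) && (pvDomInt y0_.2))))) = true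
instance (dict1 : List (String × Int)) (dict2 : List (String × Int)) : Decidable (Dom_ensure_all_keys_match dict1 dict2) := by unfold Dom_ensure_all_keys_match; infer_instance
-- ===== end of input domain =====

-- B drops A's recursion (values are ints on the declared domain, so the isinstance branch is dead),
-- compares key views as sets instead of sorting, and builds the result by a comprehension.

-- ===== PORT A =====
-- On the dict[str, int] domain A's `isinstance(v, dict)` branch never fires; every value takes the
-- `ret[k] = other[k]` branch, and `recurse` is called exactly once (no nested dicts exist).
def ensure_all_keys_match (dict1 : List (String × Int)) (dict2 : List (String × Int)) : List (String × Int) :=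
  let this := PySem.Dict.ofList dict1
  let other := PySem.Dict.ofList dict2
  let this_keys := PySem.List.sorted this.keys (fun x => x.toList) false
  let other_keys := PySem.List.sorted other.keys (fun x => x.toList) false
  if this_keys ≠ other_keys then
    []  -- Python raises KeyError here; these inputs are excluded by Pre_
  else
    -- for k, v in this.items(): ret[k] = other[k]  (lookup total: keys match under the guard)
    (this.items.foldl (fun ret kv => ret.insert kv.1 (other.getD kv.1 0)) PySem.Dict.empty).items

-- ===== PORT B =====
def ensure_all_keys_match_alt (dict1 : List (String × Int)) (dict2 : List (String × Int)) : List (String × Int) :=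
  let d1 := PySem.Dict.ofList dict1
  let d2 := PySem.Dict.ofList dict2
  -- dict1.keys() != dict2.keys(): view equality is set equality (keys unique: same size + containment)
  if d1.size = d2.size ∧ d1.keys.all (fun k => d2.contains k) then
    d1.keys.map (fun k => (k, d2.getD k 0))  -- {k: dict2[k] for k in dict1}
  else
    []  -- Python raises KeyError here; excluded by Pre_

-- ===== PRECONDITION & SPEC =====
-- Pre_ excludes exactly the inputs whose key sets differ, on which the Python A raises KeyError.
def Pre_ensure_all_keys_match (dict1 : List (String × Int)) (dict2 : List (String × Int)) : Prop :=
  PySem.List.sorted (PySem.Dict.ofList dict1).keys (fun x => x.toList) false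
    = PySem.List.sorted (PySem.Dict.ofList dict2).keys (fun x => x.toList) false
instance (dict1 : List (String × Int)) (dict2 : List (String × Int)) : Decidable (Pre_ensure_all_keys_match dict1 dict2) := by unfold Pre_ensure_all_keys_match; infer_instance
def pvWitness_ensure_all_keys_match : (List (String × Int)) × (List (String × Int)) :=
  ([("a", 1), ("b", 2)], [("b", 5), ("a", 4)])
def Spec_ensure_all_keys_match (dict1 : List (String × Int)) (dict2 : List (String × Int)) (out : List (String × Int)) : Prop := out = ensure_all_keys_match_alt dict1 dict2
instance (dict1 : List (String × Int)) (dict2 : List (String × Int)) (out : List (String × Int)) : Decidable (Spec_ensure_all_keys_match dict1 dict2 out) := by unfold Spec_ensure_all_keys_match; infer_instance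

-- ===== CLAIM (what is proved, stated in full; the proofs are below) =====
def Claim_equal_ensure_all_keys_match : Prop := ∀ (dict1 : List (String × Int)) (dict2 : List (String × Int)), Dom_ensure_all_keys_match dict1 dict2 → Pre_ensure_all_keys_match dict1 dict2 → Spec_ensure_all_keys_match dict1 dict2 (ensure_all_keys_match dict1 dict2)

-- ===== LEMMAS AND PROOFS =====

-- Equal sorted key lists mean the key lists are permutations of one another.
theorem keys_perm_of_pre (dict1 dict2 : List (String × Int))
    (h : Pre_ensure_all_keys_match dict1 dict2) :
    (PySem.Dict.ofList dict1).keys.Perm (PySem.Dict.ofList dict2).keys := by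
  unfold Pre_ensure_all_keys_match at h
  have h1 := PySem.List.sorted_perm (PySem.Dict.ofList dict1).keys (fun x : String => x.toList) false
  have h2 := PySem.List.sorted_perm (PySem.Dict.ofList dict2).keys (fun x : String => x.toList) false
  exact h1.symm.trans (h ▸ h2)

-- ===== VERDICT (by name: the statement is the Claim_ definition above) =====
theorem ensure_all_keys_match_spec : Claim_equal_ensure_all_keys_match := by
  intro dict1 dict2 _hDom hPre
  have hperm := keys_perm_of_pre dict1 dict2 hPre
  unfold Pre_ensure_all_keys_match at hPre
  simp only [Spec_ensure_all_keys_match, ensure_all_keys_match, ensure_all_keys_match_alt]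
  have hB : ((PySem.Dict.ofList dict1).size = (PySem.Dict.ofList dict2).size
      ∧ (PySem.Dict.ofList dict1).keys.all (fun k => (PySem.Dict.ofList dict2).contains k)) := by
    constructor
    · simpa [PySem.Dict.size, PySem.Dict.keys] using hperm.length_eq
    · rw [List.all_eq_true]
      intro k hk
      exact (PySem.Dict.contains_iff_mem_keys _ _).mpr (hperm.mem_iff.mp hk)
  rw [if_neg (not_not_intro hPre), if_pos hB]
  have hnd : ((PySem.Dict.ofList dict1).items.map (fun kv => kv.1)).Nodup := by
    simpa [PySem.Dict.keys] using PySem.Dict.nodup_keys_ofList dict1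
  have hfresh : ∀ kv ∈ (PySem.Dict.ofList dict1).items,
      (PySem.Dict.empty : PySem.Dict String Int).contains kv.1 = false := by
    intro kv _; simp [pysem]
  rw [PySem.Dict.items_foldl_insert_fresh _ _ _ _ hfresh hnd]
  simp only [PySem.Dict.empty, PySem.Dict.keys, List.map_map]
  rfl
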